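-- pv_equiv track=rewrite | github.com/HHansi/WhatsUp | algo/change_measures/vocabulary_calculation.py | filter_vocabulary_by_frequency_diff
-- ===== SOURCE A (Python) =====
-- def filter_vocabulary_by_frequency_diff(words, word_freq1, word_freq2, threshold):
--     """
--     Filter words if their freq. diff over t2 and t1 >= threshold
--
--     parameters
--     -----------
--     :param words: list
--     :param word_freq1: dictionary
--         Dictionary of words and their corresponding counts (word:count)
--     :param word_freq2: dictionary
--         Dictionary of words and their corresponding counts (word:count)
--     :param threshold: int
--     :return: list, dictionary
--         List of words with frequency diff above the threshold
--         Dictionary of words and their freq, diffs (word:freq_diff)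
--
--     """
--     dict_word_diff = dict()
--     filtered = []
--     for word in words:
--         f1 = word_freq1[word] if word in word_freq1 else 0
--         f2 = word_freq2[word] if word in word_freq2 else 0
--         diff = f2 - f1
--         dict_word_diff[word] = diff
--         if diff >= threshold:
--             filtered.append(word)
--     return filtered, dict_word_diff
-- ===== SOURCE B (Python) =====
-- def filter_vocabulary_by_frequency_diff(words, word_freq1, word_freq2, threshold):
--     # Compute each diff once per DISTINCT word (dict.fromkeys dedups preserving order),
--     # so duplicate occurrences never redo the two frequency lookups.
--     dict_word_diff = {}
--     for w in dict.fromkeys(words):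
--         dict_word_diff[w] = word_freq2.get(w, 0) - word_freq1.get(w, 0)
--     # Precompute the set of words that pass the threshold, then select occurrences
--     # by plain set membership.
--     passing = {w for w, d in dict_word_diff.items() if d >= threshold}
--     filtered = [w for w in words if w in passing]
--     return filtered, dict_word_diff
-- ===== Notes on version B (the rewrite author's own statement) =====
-- stated objective: alternative
-- what changed: B dedups the word list first (dict.fromkeys) and computes each frequency diff exactly once per distinct word, then derives the set of passing words from the finished table and selects occurrences by set membership, instead of A's single loop that re-looks-up both frequency dicts and re-compares the threshold at every occurrence.
import Mathlib
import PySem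

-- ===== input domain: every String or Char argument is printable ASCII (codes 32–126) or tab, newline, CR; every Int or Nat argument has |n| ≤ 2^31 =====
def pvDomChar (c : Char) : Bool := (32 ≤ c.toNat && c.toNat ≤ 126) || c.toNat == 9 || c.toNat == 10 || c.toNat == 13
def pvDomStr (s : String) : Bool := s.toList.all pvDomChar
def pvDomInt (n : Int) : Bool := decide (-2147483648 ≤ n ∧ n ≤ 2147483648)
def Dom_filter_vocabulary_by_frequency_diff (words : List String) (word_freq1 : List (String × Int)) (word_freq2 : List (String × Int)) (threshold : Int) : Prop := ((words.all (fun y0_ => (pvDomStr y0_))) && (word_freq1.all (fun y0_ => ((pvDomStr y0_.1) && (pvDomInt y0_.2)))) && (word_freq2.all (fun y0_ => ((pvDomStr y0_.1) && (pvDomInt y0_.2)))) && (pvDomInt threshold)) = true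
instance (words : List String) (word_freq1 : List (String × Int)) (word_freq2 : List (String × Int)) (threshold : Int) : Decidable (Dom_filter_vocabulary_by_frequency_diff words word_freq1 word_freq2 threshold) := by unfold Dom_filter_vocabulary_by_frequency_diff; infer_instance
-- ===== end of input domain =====

-- B dedups the words first, computes each diff once per distinct word, then selects
-- occurrences by membership in a precomputed passing set (objective: alternative).

-- ===== PORT A =====
-- A's single loop: state = (filtered list, diff dict); each step does the default lookups,
-- stores the diff, and conditionally appends — in A's order.
def filter_vocabulary_by_frequency_diff (words : List String) (word_freq1 : List (String × Int)) (word_freq2 : List (String × Int)) (threshold : Int) : List String × (List (String × Int)) :=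
  let d1 := PySem.Dict.mk word_freq1
  let d2 := PySem.Dict.mk word_freq2
  let st := words.foldl (fun (st : List String × PySem.Dict String Int) word =>
      let f1 := d1.getD word 0          -- word_freq1[word] if word in word_freq1 else 0
      let f2 := d2.getD word 0
      let diff := f2 - f1
      let dict' := st.2.insert word diff
      (if threshold ≤ diff then st.1 ++ [word] else st.1, dict'))
    ([], PySem.Dict.empty)
  (st.1, st.2.items)

-- ===== PORT B =====
-- B: diff table over dict.fromkeys(words) (= PySem.List.dedup), then the passing set
-- read off the table's items, then occurrence selection by set membership.
-- The passing set is only used for membership tests, so its (insertion) order is irrelevant.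
def filter_vocabulary_by_frequency_diff_alt (words : List String) (word_freq1 : List (String × Int)) (word_freq2 : List (String × Int)) (threshold : Int) : List String × (List (String × Int)) :=
  let d1 := PySem.Dict.mk word_freq1
  let d2 := PySem.Dict.mk word_freq2
  let dict_word_diff := (PySem.List.dedup words).foldl
      (fun d w => d.insert w (d2.getD w 0 - d1.getD w 0)) PySem.Dict.empty
  let passing := PySem.Set.ofList (((dict_word_diff.items.filter (fun p => threshold ≤ p.2)).map (fun p => p.1)))
  let filtered := words.filter (fun w => PySem.Set.contains passing w)
  (filtered, dict_word_diff.items)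

-- ===== PRECONDITION & SPEC =====
def Spec_filter_vocabulary_by_frequency_diff (words : List String) (word_freq1 : List (String × Int)) (word_freq2 : List (String × Int)) (threshold : Int) (out : List String × (List (String × Int))) : Prop := out = filter_vocabulary_by_frequency_diff_alt words word_freq1 word_freq2 threshold
instance (words : List String) (word_freq1 : List (String × Int)) (word_freq2 : List (String × Int)) (threshold : Int) (out : List String × (List (String × Int))) : Decidable (Spec_filter_vocabulary_by_frequency_diff words word_freq1 word_freq2 threshold out) := by unfold Spec_filter_vocabulary_by_frequency_diff; infer_instance

-- ===== CLAIM =====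
def Claim_equal_filter_vocabulary_by_frequency_diff : Prop := ∀ (words : List String) (word_freq1 : List (String × Int)) (word_freq2 : List (String × Int)) (threshold : Int), Dom_filter_vocabulary_by_frequency_diff words word_freq1 word_freq2 threshold → Spec_filter_vocabulary_by_frequency_diff words word_freq1 word_freq2 threshold (filter_vocabulary_by_frequency_diff words word_freq1 word_freq2 threshold)

-- ===== LEMMAS AND PROOFS =====

-- A's pair-state fold splits into the two independent component folds.
theorem pvPairFoldSplit (f : String → Int) (threshold : Int) :
    ∀ (ws : List String) (acc : List String) (d : PySem.Dict String Int),
      ws.foldl (fun (st : List String × PySem.Dict String Int) word =>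
          (if threshold ≤ f word then st.1 ++ [word] else st.1, st.2.insert word (f word))) (acc, d)
      = (ws.foldl (fun acc word => if threshold ≤ f word then acc ++ [word] else acc) acc,
         ws.foldl (fun d word => d.insert word (f word)) d) := by
  intro ws
  induction ws with
  | nil => intro acc d; rfl
  | cons x ws ih => intro acc d; simp [List.foldl_cons, ih]

-- The items of an insert loop whose value depends only on the key, over distinct keys.
theorem pvItemsChar (f : String → Int) (l : List String) (hl : l.Nodup) :
    (l.foldl (fun d w => d.insert w (f w)) PySem.Dict.empty).items
      = l.map (fun w => (w, f w)) := by
  have h := PySem.Dict.items_foldl_insert_fresh l (fun w => w) f PySem.Dict.empty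
      (fun a _ => by simp) (by simpa using hl)
  simpa using h

-- Re-inserting a word already in the table with its own value changes nothing.
theorem pvInsertSame (f : String → Int) (l : List String) (hl : l.Nodup) {x : String}
    (hx : x ∈ l) :
    (l.foldl (fun d w => d.insert w (f w)) PySem.Dict.empty).insert x (f x)
      = l.foldl (fun d w => d.insert w (f w)) PySem.Dict.empty := by
  have hkeys : (l.foldl (fun d w => d.insert w (f w)) PySem.Dict.empty).keys = l := by
    simp only [PySem.Dict.keys, pvItemsChar f l hl, List.map_map]
    exact List.map_id'' (fun w => rfl) l
  have hc : (l.foldl (fun d w => d.insert w (f w)) PySem.Dict.empty).contains x = true := by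
    rw [PySem.Dict.contains_iff_mem_keys, hkeys]; exact hx
  apply PySem.Dict.ext
  rw [PySem.Dict.items_insert_of_contains _ _ hc, pvItemsChar f l hl, List.map_map]
  apply List.map_congr_left
  intro w _
  by_cases hwx : w = x
  · subst hwx; simp
  · simp [Function.comp, hwx]

-- A's insert loop over all words equals B's insert loop over the deduped words.
theorem pvFoldDedup (f : String → Int) :
    ∀ ws : List String,
      ws.foldl (fun d w => d.insert w (f w)) PySem.Dict.empty
        = (PySem.List.dedup ws).foldl (fun d w => d.insert w (f w)) PySem.Dict.empty := by
  intro ws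
  induction ws using List.reverseRecOn with
  | nil => rfl
  | append_singleton ws x ih =>
    rw [List.foldl_append, ih, PySem.List.dedup_eq_ofList (ws ++ [x]),
        PySem.Set.ofList_append_singleton, ← PySem.List.dedup_eq_ofList ws]
    by_cases hx : x ∈ ws
    · have hxd : x ∈ PySem.List.dedup ws := (PySem.List.mem_dedup ws x).2 hx
      rw [PySem.Set.add_of_mem hxd]
      simp only [List.foldl_cons, List.foldl_nil]
      exact pvInsertSame f (PySem.List.dedup ws) (PySem.List.nodup_dedup ws) hxd
    · have hxd : x ∉ PySem.List.dedup ws := fun h => hx ((PySem.List.mem_dedup ws x).1 h)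
      rw [PySem.Set.add_of_not_mem hxd, List.foldl_append]

-- Membership in B's passing set, for a word that occurs in the list.
theorem pvPassingMem (f : String → Int) (threshold : Int) (ws : List String) (w : String)
    (hw : w ∈ ws) :
    PySem.Set.contains
      (PySem.Set.ofList (((((PySem.List.dedup ws).foldl (fun d x => d.insert x (f x)) PySem.Dict.empty).items.filter
          (fun p => threshold ≤ p.2)).map (fun p => p.1)))) w
      = decide (threshold ≤ f w) := by
  have hiff : PySem.Set.contains
      (PySem.Set.ofList (((((PySem.List.dedup ws).foldl (fun d x => d.insert x (f x)) PySem.Dict.empty).items.filter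
          (fun p => threshold ≤ p.2)).map (fun p => p.1)))) w = true ↔ threshold ≤ f w := by
    rw [PySem.Set.contains_iff, PySem.Set.mem_ofList,
        pvItemsChar f (PySem.List.dedup ws) (PySem.List.nodup_dedup ws)]
    constructor
    · intro hmem
      rcases List.mem_map.1 hmem with ⟨p, hp, hfst⟩
      rcases List.mem_filter.1 hp with ⟨hpmem, hle⟩
      rcases List.mem_map.1 hpmem with ⟨u, _, hpair⟩
      subst hpair
      subst hfst
      exact of_decide_eq_true hle
    · intro hle
      exact List.mem_map.2 ⟨(w, f w),
        List.mem_filter.2 ⟨List.mem_map.2 ⟨w, (PySem.List.mem_dedup ws w).2 hw, rfl⟩,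
          decide_eq_true hle⟩, rfl⟩
  by_cases h : threshold ≤ f w
  · rw [hiff.2 h]
    exact (decide_eq_true h).symm
  · have hne : ¬ (PySem.Set.contains _ w = true) := fun hc => h (hiff.1 hc)
    rw [Bool.not_eq_true] at hne
    rw [hne]
    exact (decide_eq_false h).symm

-- ===== VERDICT =====
theorem filter_vocabulary_by_frequency_diff_spec : Claim_equal_filter_vocabulary_by_frequency_diff := by
  intro words word_freq1 word_freq2 threshold _
  unfold Spec_filter_vocabulary_by_frequency_diff
  unfold filter_vocabulary_by_frequency_diff filter_vocabulary_by_frequency_diff_alt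
  simp only []
  set d1 := PySem.Dict.mk word_freq1 with hd1
  set d2 := PySem.Dict.mk word_freq2 with hd2
  rw [pvPairFoldSplit (fun w => d2.getD w 0 - d1.getD w 0) threshold words [] PySem.Dict.empty]
  rw [pvFoldDedup (fun w => d2.getD w 0 - d1.getD w 0) words]
  refine Prod.ext ?_ rfl
  simp only []
  have hfun : (fun (acc : List String) word =>
        if threshold ≤ d2.getD word 0 - d1.getD word 0 then acc ++ [word] else acc)
      = (fun acc word =>
        if (fun w => decide (threshold ≤ d2.getD w 0 - d1.getD w 0)) word = true
        then acc ++ [id word] else acc) := by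
    funext acc w
    by_cases h : threshold ≤ d2.getD w 0 - d1.getD w 0 <;> simp [h]
  rw [hfun, PySem.List.foldl_append_if]
  simp only [List.nil_append, List.map_id]
  apply List.filter_congr
  intro w hw
  rw [pvPassingMem (fun w => d2.getD w 0 - d1.getD w 0) threshold words w hw]
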